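-- pv_equiv track=rewrite | github.com/Tomas-Tamantini/advent-of-code-python | models/aoc_2019/a2019_d1.py | fuel_requirement
-- ===== SOURCE A (Python) =====
-- def _fuel_for_mass(mass: int) -> int:
--     return max(0, mass // 3 - 2)
--
-- def fuel_requirement(rocket_mass: int, consider_fuel_mass: bool) -> int:
--     fuel = _fuel_for_mass(rocket_mass)
--     if not consider_fuel_mass:
--         return fuel
--     extra_mass = fuel
--     while extra_mass:
--         extra_mass = _fuel_for_mass(extra_mass)
--         fuel += extra_mass
--     return fuel
-- ===== SOURCE B (Python) =====
-- def _fuel_for_mass(mass: int) -> int: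
--     return max(0, mass // 3 - 2)
--
-- def fuel_requirement(rocket_mass: int, consider_fuel_mass: bool) -> int:
--     fuel = _fuel_for_mass(rocket_mass)
--     if not consider_fuel_mass or fuel == 0:
--         return fuel
--     return fuel + fuel_requirement(fuel, True)
-- ===== Notes on version B (the rewrite author's own statement) =====
-- stated objective: simpler
-- what changed: Replaced the while-loop accumulator with a direct recursion expressing total(m) = f(m) + total(f(m)), with f(m)=0 as the base case.
import Mathlib
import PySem

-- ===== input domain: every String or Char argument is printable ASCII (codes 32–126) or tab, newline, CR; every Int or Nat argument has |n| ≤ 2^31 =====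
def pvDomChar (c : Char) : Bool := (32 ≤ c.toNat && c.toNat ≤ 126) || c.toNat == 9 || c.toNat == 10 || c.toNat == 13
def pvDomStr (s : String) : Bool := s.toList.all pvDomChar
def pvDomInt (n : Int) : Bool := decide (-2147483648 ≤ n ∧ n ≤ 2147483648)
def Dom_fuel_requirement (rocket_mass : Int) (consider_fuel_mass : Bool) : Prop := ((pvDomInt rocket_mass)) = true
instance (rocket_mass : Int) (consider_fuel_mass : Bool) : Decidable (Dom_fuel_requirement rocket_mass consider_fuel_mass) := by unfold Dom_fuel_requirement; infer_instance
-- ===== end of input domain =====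

-- B replaces A's while-loop accumulator with a direct recursion total(m) = f(m) + total(f(m)) (objective: simpler).

-- ===== PORT A =====
-- shared helper: _fuel_for_mass (identical in Source A and Source B)
def pvFuelFor (mass : Int) : Int := max 0 (PySem.Int.floordiv mass 3 - 2)

theorem pvFuelFor_nonneg (m : Int) : 0 ≤ pvFuelFor m := le_max_left 0 _

theorem pvFuelFor_lt (m : Int) (h : 0 < m) : pvFuelFor m < m := by
  unfold pvFuelFor
  rw [PySem.Int.floordiv_eq_ediv_of_pos (by omega)]
  omega

-- measure decrease for A's while loop (Python loops while extra_mass ≠ 0)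
theorem pvLoopA_dec (e : Int) (h : e ≠ 0) :
    (pvFuelFor e).toNat + (if pvFuelFor e < 0 then 1 else 0)
      < e.toNat + (if e < 0 then 1 else 0) := by
  rcases lt_or_gt_of_ne h with hneg | hpos
  · have : pvFuelFor e = 0 := by
      unfold pvFuelFor
      rw [PySem.Int.floordiv_eq_ediv_of_pos (by omega : (0:Int) < 3)] at *
      omega
    simp [this, hneg]
  · have h1 := pvFuelFor_lt e hpos
    have h2 := pvFuelFor_nonneg e
    have : ¬ pvFuelFor e < 0 := by omega
    simp only [this, if_neg, hpos.not_gt]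
    omega

-- the 'while extra_mass:' loop of A, with state (fuel, extra_mass)
def pvLoopA (fuel extra : Int) : Int :=
  if h : extra ≠ 0 then pvLoopA (fuel + pvFuelFor extra) (pvFuelFor extra) else fuel
termination_by extra.toNat + (if extra < 0 then 1 else 0)
decreasing_by exact pvLoopA_dec extra h

def fuel_requirement (rocket_mass : Int) (consider_fuel_mass : Bool) : Int :=
  let fuel := pvFuelFor rocket_mass
  if !consider_fuel_mass then fuel
  else pvLoopA fuel fuel

-- ===== PORT B =====
theorem pvFuelFor_lt_of_pos (m : Int) (h : 0 < pvFuelFor m) : pvFuelFor m < m := by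
  unfold pvFuelFor at *
  rw [PySem.Int.floordiv_eq_ediv_of_pos (by omega : (0:Int) < 3)] at *
  omega

def fuel_requirement_alt (rocket_mass : Int) (consider_fuel_mass : Bool) : Int :=
  let fuel := pvFuelFor rocket_mass
  if !consider_fuel_mass || fuel == 0 then fuel
  else fuel + fuel_requirement_alt fuel true
termination_by (pvFuelFor rocket_mass).toNat + 1
decreasing_by
  rename_i hcond
  simp only [Bool.or_eq_true, beq_iff_eq, not_or, Bool.not_eq_true'] at hcond
  have h1 := pvFuelFor_nonneg rocket_mass
  have h2 : 0 < pvFuelFor rocket_mass := lt_of_le_of_ne h1 (Ne.symm hcond.2)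
  have h3 := pvFuelFor_lt_of_pos (pvFuelFor rocket_mass)
  have h4 := pvFuelFor_nonneg (pvFuelFor rocket_mass)
  by_cases hp : 0 < pvFuelFor (pvFuelFor rocket_mass)
  · have := h3 hp; omega
  · omega

-- ===== PRECONDITION & SPEC =====
def Spec_fuel_requirement (rocket_mass : Int) (consider_fuel_mass : Bool) (out : Int) : Prop := out = fuel_requirement_alt rocket_mass consider_fuel_mass
instance (rocket_mass : Int) (consider_fuel_mass : Bool) (out : Int) : Decidable (Spec_fuel_requirement rocket_mass consider_fuel_mass out) := by unfold Spec_fuel_requirement; infer_instance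

-- ===== CLAIM (what is proved, stated in full; the proofs are below) =====
def Claim_equal_fuel_requirement : Prop := ∀ (rocket_mass : Int) (consider_fuel_mass : Bool), Dom_fuel_requirement rocket_mass consider_fuel_mass → Spec_fuel_requirement rocket_mass consider_fuel_mass (fuel_requirement rocket_mass consider_fuel_mass)

-- ===== LEMMAS AND PROOFS =====

theorem pvFuelFor_zero : pvFuelFor 0 = 0 := by decide

theorem pvAlt_zero : fuel_requirement_alt 0 true = 0 := by
  rw [fuel_requirement_alt]; simp [pvFuelFor_zero]

-- loop/recursion correspondence: loopA fuel extra = fuel + B's chain total starting at extra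
theorem pvLoopA_eq_aux (n : Nat) :
    ∀ (extra : Int), extra = (n : Int) →
      ∀ fuel, pvLoopA fuel extra = fuel + fuel_requirement_alt extra true := by
  induction n using Nat.strong_induction_on with
  | _ n ih =>
    intro extra hn fuel
    subst hn
    by_cases h0 : n = 0
    · subst h0
      rw [pvLoopA, fuel_requirement_alt]
      simp [pvFuelFor_zero]
    · have h0' : ((n : Int)) ≠ 0 := by exact_mod_cast h0
      have hpos : 0 < ((n : Int)) := lt_of_le_of_ne (by positivity) (Ne.symm h0')
      rw [pvLoopA, dif_pos h0']
      have hlt : pvFuelFor (n : Int) < (n : Int) := pvFuelFor_lt _ hpos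
      have hnn : 0 ≤ pvFuelFor (n : Int) := pvFuelFor_nonneg _
      rw [ih (pvFuelFor (n : Int)).toNat (by omega) (pvFuelFor (n : Int))
            (Int.toNat_of_nonneg hnn).symm (fuel + pvFuelFor (n : Int))]
      conv_rhs => rw [fuel_requirement_alt]
      by_cases hf : pvFuelFor (n : Int) = 0
      · simp [hf, pvAlt_zero]
      · simp only [Bool.not_true, Bool.false_or, beq_iff_eq, hf, if_neg, not_false_iff]
        ring

theorem pvLoopA_eq (extra : Int) (he : 0 ≤ extra) (fuel : Int) :
    pvLoopA fuel extra = fuel + fuel_requirement_alt extra true :=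
  pvLoopA_eq_aux extra.toNat extra (Int.toNat_of_nonneg he).symm fuel

-- ===== VERDICT (by name: the statement is the Claim_ definition above) =====
theorem fuel_requirement_spec : Claim_equal_fuel_requirement := by
  intro m c _
  unfold Spec_fuel_requirement fuel_requirement
  cases c with
  | false =>
    rw [fuel_requirement_alt]; simp
  | true =>
    simp only [Bool.not_true, Bool.false_eq_true, if_false]
    rw [pvLoopA_eq (pvFuelFor m) (pvFuelFor_nonneg m) (pvFuelFor m)]
    conv_rhs => rw [fuel_requirement_alt]
    by_cases hf : pvFuelFor m = 0
    · simp [hf, pvAlt_zero]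
    · simp [hf]
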